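-- pv_equiv track=rewrite | github.com/jacobpeart-cyber/pysoar | src/agents/capabilities.py | capability_allows
-- ===== SOURCE A (Python) =====
-- from enum import Enum
--
-- class AgentCapability(str, Enum):
--     """Capability classes an agent may be enrolled with.
--
--     An agent may have multiple capabilities — e.g. a lab host used for
--     both Breach & Attack Simulation and Purple Team exercises. IR
--     capability is intentionally separable so IR agents can ship to
--     production endpoints without carrying the BAS atomic test library.
--     """
--
--     BAS = "bas"              # Runs MITRE ATT&CK atomic tests
--     LIVE_RESPONSE = "ir"     # Incident response actions: kill/isolate/collect
--     PURPLE_TEAM = "purple"   # Orchestrated red+blue live correlation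
--
-- class AgentAction(str, Enum):
--     """Concrete actions a command may request.
--
--     Every action is bounded, parameterized, and reviewable. There is
--     intentionally no generic "exec_shell" — a SOC platform must not be
--     a C2. If a future action is needed, it's added here, an allowlisted
--     implementation is shipped in the agent, and the command hash is
--     re-pinned.
--     """
--
--     # --- BAS ---
--     RUN_ATOMIC_TEST = "run_atomic_test"        # payload = {mitre_id, target_host}
--
--     # --- Live Response (IR) ---
--     KILL_PROCESS = "kill_process"              # payload = {pid or process_name}
--     ISOLATE_HOST = "isolate_host"              # network quarantine
--     RELEASE_HOST = "release_host"              # reverse isolate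
--     DISABLE_ACCOUNT = "disable_account"        # payload = {username}
--     COLLECT_FILE = "collect_file"              # payload = {path}
--     COLLECT_PROCESS_LIST = "collect_process_list"
--     COLLECT_NETWORK_CONNECTIONS = "collect_network_connections"
--     COLLECT_MEMORY_DUMP = "collect_memory_dump"
--     QUARANTINE_FILE = "quarantine_file"        # payload = {path}
--     UNQUARANTINE_FILE = "unquarantine_file"
--
--     # --- Purple Team ---
--     PURPLE_FIRE_TECHNIQUE = "purple_fire_technique"  # BAS test + live SIEM watch
--
-- CAPABILITY_ACTIONS: dict[AgentCapability, set[AgentAction]] = {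
--     AgentCapability.BAS: {
--         AgentAction.RUN_ATOMIC_TEST,
--     },
--     AgentCapability.LIVE_RESPONSE: {
--         AgentAction.KILL_PROCESS,
--         AgentAction.ISOLATE_HOST,
--         AgentAction.RELEASE_HOST,
--         AgentAction.DISABLE_ACCOUNT,
--         AgentAction.COLLECT_FILE,
--         AgentAction.COLLECT_PROCESS_LIST,
--         AgentAction.COLLECT_NETWORK_CONNECTIONS,
--         AgentAction.COLLECT_MEMORY_DUMP,
--         AgentAction.QUARANTINE_FILE,
--         AgentAction.UNQUARANTINE_FILE,
--     },
--     AgentCapability.PURPLE_TEAM: {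
--         AgentAction.RUN_ATOMIC_TEST,
--         AgentAction.PURPLE_FIRE_TECHNIQUE,
--         AgentAction.COLLECT_PROCESS_LIST,
--     },
-- }
--
-- def capability_allows(capabilities: list[str], action: str) -> bool:
--     """Return True if ``action`` is permitted for any of the given capabilities.
--
--     Accepts strings (the DB stores JSON lists of strings) so callers
--     don't have to round-trip through the enums.
--     """
--     try:
--         action_enum = AgentAction(action)
--     except ValueError:
--         return False
--
--     for cap in capabilities:
--         try:
--             cap_enum = AgentCapability(cap)
--         except ValueError:
--             continue
--         if action_enum in CAPABILITY_ACTIONS.get(cap_enum, set()):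
--             return True
--     return False
-- ===== SOURCE B (Python) =====
-- from enum import Enum
--
-- class AgentCapability(str, Enum):
--     BAS = "bas"
--     LIVE_RESPONSE = "ir"
--     PURPLE_TEAM = "purple"
--
-- class AgentAction(str, Enum):
--     RUN_ATOMIC_TEST = "run_atomic_test"
--     KILL_PROCESS = "kill_process"
--     ISOLATE_HOST = "isolate_host"
--     RELEASE_HOST = "release_host"
--     DISABLE_ACCOUNT = "disable_account"
--     COLLECT_FILE = "collect_file"
--     COLLECT_PROCESS_LIST = "collect_process_list"
--     COLLECT_NETWORK_CONNECTIONS = "collect_network_connections"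
--     COLLECT_MEMORY_DUMP = "collect_memory_dump"
--     QUARANTINE_FILE = "quarantine_file"
--     UNQUARANTINE_FILE = "unquarantine_file"
--     PURPLE_FIRE_TECHNIQUE = "purple_fire_technique"
--
-- CAPABILITY_ACTIONS = {
--     AgentCapability.BAS: {
--         AgentAction.RUN_ATOMIC_TEST,
--     },
--     AgentCapability.LIVE_RESPONSE: {
--         AgentAction.KILL_PROCESS,
--         AgentAction.ISOLATE_HOST,
--         AgentAction.RELEASE_HOST,
--         AgentAction.DISABLE_ACCOUNT,
--         AgentAction.COLLECT_FILE,
--         AgentAction.COLLECT_PROCESS_LIST,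
--         AgentAction.COLLECT_NETWORK_CONNECTIONS,
--         AgentAction.COLLECT_MEMORY_DUMP,
--         AgentAction.QUARANTINE_FILE,
--         AgentAction.UNQUARANTINE_FILE,
--     },
--     AgentCapability.PURPLE_TEAM: {
--         AgentAction.RUN_ATOMIC_TEST,
--         AgentAction.PURPLE_FIRE_TECHNIQUE,
--         AgentAction.COLLECT_PROCESS_LIST,
--     },
-- }
--
-- # Inverted index, built once: action value -> set of capability values that permit it.
-- ACTION_TO_CAPS: dict[str, set[str]] = {}
-- for _cap, _actions in CAPABILITY_ACTIONS.items():
--     for _act in _actions: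
--         ACTION_TO_CAPS.setdefault(_act.value, set()).add(_cap.value)
--
-- def capability_allows(capabilities: list[str], action: str) -> bool:
--     """Return True if ``action`` is permitted for any of the given capabilities."""
--     allowed = ACTION_TO_CAPS.get(action)
--     if allowed is None:
--         return False
--     return not allowed.isdisjoint(capabilities)
-- ===== Notes on version B (the rewrite author's own statement) =====
-- stated objective: alternative
-- what changed: B replaces A's per-capability loop (parse each capability, then test action membership in its action set) by an inverted index built once at module load (action value -> set of permitting capability values); each query becomes one dict lookup plus a set-disjointness test against the given capability list.
import Mathlib
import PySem

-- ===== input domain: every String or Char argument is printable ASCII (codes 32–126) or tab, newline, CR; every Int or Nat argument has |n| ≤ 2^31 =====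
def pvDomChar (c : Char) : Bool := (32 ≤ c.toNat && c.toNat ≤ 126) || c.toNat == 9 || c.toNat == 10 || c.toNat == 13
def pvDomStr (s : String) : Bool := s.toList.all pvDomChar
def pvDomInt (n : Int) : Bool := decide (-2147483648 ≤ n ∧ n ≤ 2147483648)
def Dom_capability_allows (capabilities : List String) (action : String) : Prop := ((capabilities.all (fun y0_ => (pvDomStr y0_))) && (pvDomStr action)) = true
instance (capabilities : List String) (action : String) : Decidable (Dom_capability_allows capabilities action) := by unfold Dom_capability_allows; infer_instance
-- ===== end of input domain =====

-- B replaces A's per-capability membership loop by an inverted index (action → permitting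
-- capabilities) built once, answering each query by one lookup plus a set-disjointness test
-- (objective: alternative/idiomatic; same observable return value).

-- ===== PORT A =====
-- AgentAction values, in declaration order (AgentAction(action) succeeds iff action is one of these)
def pvActionValues : List String :=
  ["run_atomic_test", "kill_process", "isolate_host", "release_host", "disable_account",
   "collect_file", "collect_process_list", "collect_network_connections",
   "collect_memory_dump", "quarantine_file", "unquarantine_file", "purple_fire_technique"]

-- AgentCapability values (AgentCapability(cap) succeeds iff cap is one of these)
def pvCapValues : List String := ["bas", "ir", "purple"]

-- CAPABILITY_ACTIONS, keys/values as strings (a Python set is a PySem.Set)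
def pvCapabilityActions : PySem.Dict String (PySem.Set String) :=
  PySem.Dict.ofList
    [("bas", PySem.Set.ofList ["run_atomic_test"]),
     ("ir", PySem.Set.ofList
        ["kill_process", "isolate_host", "release_host", "disable_account", "collect_file",
         "collect_process_list", "collect_network_connections", "collect_memory_dump",
         "quarantine_file", "unquarantine_file"]),
     ("purple", PySem.Set.ofList
        ["run_atomic_test", "purple_fire_technique", "collect_process_list"])]

-- the 'for cap in capabilities' loop: invalid cap → continue; hit → return True
def pvCapLoopA (capabilities : List String) (action : String) : Bool :=
  match capabilities with
  | [] => false
  | c :: rest =>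
    if pvCapValues.contains c then
      if PySem.Set.contains (pvCapabilityActions.getD c PySem.Set.empty) action then true
      else pvCapLoopA rest action
    else pvCapLoopA rest action

def capability_allows (capabilities : List String) (action : String) : Bool :=
  -- try: AgentAction(action) except ValueError: return False
  if pvActionValues.contains action then pvCapLoopA capabilities action
  else false

-- ===== PORT B =====
-- module-level build of the inverted index ACTION_TO_CAPS:
-- for cap, actions in CAPABILITY_ACTIONS: for act in actions: ACTION_TO_CAPS.setdefault(act, set()).add(cap)
def pvCapActionsB : List (String × PySem.Set String) :=
  [("bas", PySem.Set.ofList ["run_atomic_test"]),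
   ("ir", PySem.Set.ofList
      ["kill_process", "isolate_host", "release_host", "disable_account", "collect_file",
       "collect_process_list", "collect_network_connections", "collect_memory_dump",
       "quarantine_file", "unquarantine_file"]),
   ("purple", PySem.Set.ofList
      ["run_atomic_test", "purple_fire_technique", "collect_process_list"])]

def pvActionToCaps : PySem.Dict String (PySem.Set String) :=
  pvCapActionsB.foldl
    (fun d p => p.2.foldl (fun d act => d.modify act PySem.Set.empty (fun s => PySem.Set.add s p.1)) d)
    PySem.Dict.empty

def capability_allows_alt (capabilities : List String) (action : String) : Bool :=
  match pvActionToCaps.get? action with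
  | none => false
  | some allowed => !(PySem.Set.isdisjoint allowed capabilities)

-- ===== PRECONDITION & SPEC =====
def Spec_capability_allows (capabilities : List String) (action : String) (out : Bool) : Prop := out = capability_allows_alt capabilities action
instance (capabilities : List String) (action : String) (out : Bool) : Decidable (Spec_capability_allows capabilities action out) := by unfold Spec_capability_allows; infer_instance

-- ===== CLAIM (what is proved, stated in full; the proofs are below) =====
def Claim_equal_capability_allows : Prop := ∀ (capabilities : List String) (action : String), Dom_capability_allows capabilities action → Spec_capability_allows capabilities action (capability_allows capabilities action)

-- ===== LEMMAS AND PROOFS =====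

-- the two literal dictionaries, evaluated to their item lists
theorem pvCapabilityActions_mk : pvCapabilityActions = PySem.Dict.mk [("bas", ["run_atomic_test"]), ("ir", ["kill_process", "isolate_host", "release_host", "disable_account", "collect_file", "collect_process_list", "collect_network_connections", "collect_memory_dump", "quarantine_file", "unquarantine_file"]), ("purple", ["run_atomic_test", "purple_fire_technique", "collect_process_list"])] := by decide

theorem pvActionToCaps_mk : pvActionToCaps = PySem.Dict.mk [("run_atomic_test", ["bas", "purple"]), ("kill_process", ["ir"]), ("isolate_host", ["ir"]), ("release_host", ["ir"]), ("disable_account", ["ir"]), ("collect_file", ["ir"]), ("collect_process_list", ["ir", "purple"]), ("collect_network_connections", ["ir"]), ("collect_memory_dump", ["ir"]), ("quarantine_file", ["ir"]), ("unquarantine_file", ["ir"]), ("purple_fire_technique", ["purple"])] := by decide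

-- an invalid action string is not a key of the inverted index
theorem pvActionToCaps_get?_none (a : String) (h : pvActionValues.contains a = false) :
    pvActionToCaps.get? a = none := by
  simp [pvActionValues, List.contains_eq_mem] at h
  obtain ⟨h1, h2, h3, h4, h5, h6, h7, h8, h9, h10, h11, h12⟩ := h
  rw [pvActionToCaps_mk]
  simp [PySem.Dict.get?_mk_cons, beq_iff_eq, Ne.symm h1, Ne.symm h2, Ne.symm h3, Ne.symm h4,
    Ne.symm h5, Ne.symm h6, Ne.symm h7, Ne.symm h8, Ne.symm h9, Ne.symm h10, Ne.symm h11,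
    Ne.symm h12]
  rfl

-- the central inversion fact: action a is in CAPABILITY_ACTIONS[c] iff c is in ACTION_TO_CAPS[a]
set_option maxHeartbeats 2000000 in
theorem pvInversion (c a : String) :
    PySem.Set.contains (pvCapabilityActions.getD c PySem.Set.empty) a
      = PySem.Set.contains ((pvActionToCaps.get? a).getD PySem.Set.empty) c := by
  by_cases ha1 : a = "run_atomic_test"
  · subst ha1
    rw [show pvActionToCaps.get? "run_atomic_test" = some ["bas", "purple"] from by rw [pvActionToCaps_mk]; decide]
    by_cases hc1 : c = "bas"
    · subst hc1; decide
    by_cases hc2 : c = "ir"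
    · subst hc2; decide
    by_cases hc3 : c = "purple"
    · subst hc3; decide
    rw [pvCapabilityActions_mk]
    simp [PySem.Dict.getD_eq_get?_getD, PySem.Dict.get?_mk_cons, beq_iff_eq, PySem.Dict.get?,
      PySem.Set.contains, List.contains_eq_mem, Ne.symm hc1, Ne.symm hc2, Ne.symm hc3, hc1, hc2, hc3]
  by_cases ha2 : a = "kill_process"
  · subst ha2
    rw [show pvActionToCaps.get? "kill_process" = some ["ir"] from by rw [pvActionToCaps_mk]; decide]
    by_cases hc1 : c = "bas"
    · subst hc1; decide
    by_cases hc2 : c = "ir"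
    · subst hc2; decide
    by_cases hc3 : c = "purple"
    · subst hc3; decide
    rw [pvCapabilityActions_mk]
    simp [PySem.Dict.getD_eq_get?_getD, PySem.Dict.get?_mk_cons, beq_iff_eq, PySem.Dict.get?,
      PySem.Set.contains, List.contains_eq_mem, Ne.symm hc1, Ne.symm hc2, Ne.symm hc3, hc1, hc2, hc3]
  by_cases ha3 : a = "isolate_host"
  · subst ha3
    rw [show pvActionToCaps.get? "isolate_host" = some ["ir"] from by rw [pvActionToCaps_mk]; decide]
    by_cases hc1 : c = "bas"
    · subst hc1; decide
    by_cases hc2 : c = "ir"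
    · subst hc2; decide
    by_cases hc3 : c = "purple"
    · subst hc3; decide
    rw [pvCapabilityActions_mk]
    simp [PySem.Dict.getD_eq_get?_getD, PySem.Dict.get?_mk_cons, beq_iff_eq, PySem.Dict.get?,
      PySem.Set.contains, List.contains_eq_mem, Ne.symm hc1, Ne.symm hc2, Ne.symm hc3, hc1, hc2, hc3]
  by_cases ha4 : a = "release_host"
  · subst ha4
    rw [show pvActionToCaps.get? "release_host" = some ["ir"] from by rw [pvActionToCaps_mk]; decide]
    by_cases hc1 : c = "bas"
    · subst hc1; decide
    by_cases hc2 : c = "ir"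
    · subst hc2; decide
    by_cases hc3 : c = "purple"
    · subst hc3; decide
    rw [pvCapabilityActions_mk]
    simp [PySem.Dict.getD_eq_get?_getD, PySem.Dict.get?_mk_cons, beq_iff_eq, PySem.Dict.get?,
      PySem.Set.contains, List.contains_eq_mem, Ne.symm hc1, Ne.symm hc2, Ne.symm hc3, hc1, hc2, hc3]
  by_cases ha5 : a = "disable_account"
  · subst ha5
    rw [show pvActionToCaps.get? "disable_account" = some ["ir"] from by rw [pvActionToCaps_mk]; decide]
    by_cases hc1 : c = "bas"
    · subst hc1; decide
    by_cases hc2 : c = "ir"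
    · subst hc2; decide
    by_cases hc3 : c = "purple"
    · subst hc3; decide
    rw [pvCapabilityActions_mk]
    simp [PySem.Dict.getD_eq_get?_getD, PySem.Dict.get?_mk_cons, beq_iff_eq, PySem.Dict.get?,
      PySem.Set.contains, List.contains_eq_mem, Ne.symm hc1, Ne.symm hc2, Ne.symm hc3, hc1, hc2, hc3]
  by_cases ha6 : a = "collect_file"
  · subst ha6
    rw [show pvActionToCaps.get? "collect_file" = some ["ir"] from by rw [pvActionToCaps_mk]; decide]
    by_cases hc1 : c = "bas"
    · subst hc1; decide
    by_cases hc2 : c = "ir"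
    · subst hc2; decide
    by_cases hc3 : c = "purple"
    · subst hc3; decide
    rw [pvCapabilityActions_mk]
    simp [PySem.Dict.getD_eq_get?_getD, PySem.Dict.get?_mk_cons, beq_iff_eq, PySem.Dict.get?,
      PySem.Set.contains, List.contains_eq_mem, Ne.symm hc1, Ne.symm hc2, Ne.symm hc3, hc1, hc2, hc3]
  by_cases ha7 : a = "collect_process_list"
  · subst ha7
    rw [show pvActionToCaps.get? "collect_process_list" = some ["ir", "purple"] from by rw [pvActionToCaps_mk]; decide]
    by_cases hc1 : c = "bas"
    · subst hc1; decide
    by_cases hc2 : c = "ir"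
    · subst hc2; decide
    by_cases hc3 : c = "purple"
    · subst hc3; decide
    rw [pvCapabilityActions_mk]
    simp [PySem.Dict.getD_eq_get?_getD, PySem.Dict.get?_mk_cons, beq_iff_eq, PySem.Dict.get?,
      PySem.Set.contains, List.contains_eq_mem, Ne.symm hc1, Ne.symm hc2, Ne.symm hc3, hc1, hc2, hc3]
  by_cases ha8 : a = "collect_network_connections"
  · subst ha8
    rw [show pvActionToCaps.get? "collect_network_connections" = some ["ir"] from by rw [pvActionToCaps_mk]; decide]
    by_cases hc1 : c = "bas"
    · subst hc1; decide
    by_cases hc2 : c = "ir"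
    · subst hc2; decide
    by_cases hc3 : c = "purple"
    · subst hc3; decide
    rw [pvCapabilityActions_mk]
    simp [PySem.Dict.getD_eq_get?_getD, PySem.Dict.get?_mk_cons, beq_iff_eq, PySem.Dict.get?,
      PySem.Set.contains, List.contains_eq_mem, Ne.symm hc1, Ne.symm hc2, Ne.symm hc3, hc1, hc2, hc3]
  by_cases ha9 : a = "collect_memory_dump"
  · subst ha9
    rw [show pvActionToCaps.get? "collect_memory_dump" = some ["ir"] from by rw [pvActionToCaps_mk]; decide]
    by_cases hc1 : c = "bas"
    · subst hc1; decide
    by_cases hc2 : c = "ir"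
    · subst hc2; decide
    by_cases hc3 : c = "purple"
    · subst hc3; decide
    rw [pvCapabilityActions_mk]
    simp [PySem.Dict.getD_eq_get?_getD, PySem.Dict.get?_mk_cons, beq_iff_eq, PySem.Dict.get?,
      PySem.Set.contains, List.contains_eq_mem, Ne.symm hc1, Ne.symm hc2, Ne.symm hc3, hc1, hc2, hc3]
  by_cases ha10 : a = "quarantine_file"
  · subst ha10
    rw [show pvActionToCaps.get? "quarantine_file" = some ["ir"] from by rw [pvActionToCaps_mk]; decide]
    by_cases hc1 : c = "bas"
    · subst hc1; decide
    by_cases hc2 : c = "ir"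
    · subst hc2; decide
    by_cases hc3 : c = "purple"
    · subst hc3; decide
    rw [pvCapabilityActions_mk]
    simp [PySem.Dict.getD_eq_get?_getD, PySem.Dict.get?_mk_cons, beq_iff_eq, PySem.Dict.get?,
      PySem.Set.contains, List.contains_eq_mem, Ne.symm hc1, Ne.symm hc2, Ne.symm hc3, hc1, hc2, hc3]
  by_cases ha11 : a = "unquarantine_file"
  · subst ha11
    rw [show pvActionToCaps.get? "unquarantine_file" = some ["ir"] from by rw [pvActionToCaps_mk]; decide]
    by_cases hc1 : c = "bas"
    · subst hc1; decide
    by_cases hc2 : c = "ir"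
    · subst hc2; decide
    by_cases hc3 : c = "purple"
    · subst hc3; decide
    rw [pvCapabilityActions_mk]
    simp [PySem.Dict.getD_eq_get?_getD, PySem.Dict.get?_mk_cons, beq_iff_eq, PySem.Dict.get?,
      PySem.Set.contains, List.contains_eq_mem, Ne.symm hc1, Ne.symm hc2, Ne.symm hc3, hc1, hc2, hc3]
  by_cases ha12 : a = "purple_fire_technique"
  · subst ha12
    rw [show pvActionToCaps.get? "purple_fire_technique" = some ["purple"] from by rw [pvActionToCaps_mk]; decide]
    by_cases hc1 : c = "bas"
    · subst hc1; decide
    by_cases hc2 : c = "ir"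
    · subst hc2; decide
    by_cases hc3 : c = "purple"
    · subst hc3; decide
    rw [pvCapabilityActions_mk]
    simp [PySem.Dict.getD_eq_get?_getD, PySem.Dict.get?_mk_cons, beq_iff_eq, PySem.Dict.get?,
      PySem.Set.contains, List.contains_eq_mem, Ne.symm hc1, Ne.symm hc2, Ne.symm hc3, hc1, hc2, hc3]
  have hnone : pvActionToCaps.get? a = none := pvActionToCaps_get?_none a (by
    simp [pvActionValues, List.contains_eq_mem, ha1, ha2, ha3, ha4, ha5, ha6, ha7, ha8, ha9, ha10, ha11, ha12])
  rw [hnone]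
  by_cases hc1 : c = "bas"
  · subst hc1
    rw [show pvCapabilityActions.getD "bas" PySem.Set.empty = ["run_atomic_test"] from by
        rw [pvCapabilityActions_mk]; decide]
    simp [PySem.Set.contains, List.contains_eq_mem, ha1]
  by_cases hc2 : c = "ir"
  · subst hc2
    rw [show pvCapabilityActions.getD "ir" PySem.Set.empty = ["kill_process", "isolate_host", "release_host", "disable_account", "collect_file", "collect_process_list", "collect_network_connections", "collect_memory_dump", "quarantine_file", "unquarantine_file"] from by
        rw [pvCapabilityActions_mk]; decide]
    simp [PySem.Set.contains, List.contains_eq_mem, ha2, ha3, ha4, ha5, ha6, ha7, ha8, ha9, ha10, ha11]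
  by_cases hc3 : c = "purple"
  · subst hc3
    rw [show pvCapabilityActions.getD "purple" PySem.Set.empty = ["run_atomic_test", "purple_fire_technique", "collect_process_list"] from by
        rw [pvCapabilityActions_mk]; decide]
    simp [PySem.Set.contains, List.contains_eq_mem, ha1, ha12, ha7]
  rw [pvCapabilityActions_mk]
  simp [PySem.Dict.getD_eq_get?_getD, PySem.Dict.get?_mk_cons, beq_iff_eq, PySem.Dict.get?,
    Ne.symm hc1, Ne.symm hc2, Ne.symm hc3]

-- a capability string outside AgentCapability contributes nothing to A's loop
theorem pvInvalidCap (c a : String) (hc : pvCapValues.contains c = false) :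
    PySem.Set.contains (pvCapabilityActions.getD c PySem.Set.empty) a = false := by
  simp [pvCapValues, List.contains_eq_mem] at hc
  obtain ⟨hc1, hc2, hc3⟩ := hc
  rw [pvCapabilityActions_mk]
  simp [PySem.Dict.getD_eq_get?_getD, PySem.Dict.get?_mk_cons, beq_iff_eq, PySem.Dict.get?,
    Ne.symm hc1, Ne.symm hc2, Ne.symm hc3]

-- A's loop is 'any' of the per-capability membership check
theorem pvCapLoopA_eq_any (capabilities : List String) (action : String) :
    pvCapLoopA capabilities action
      = capabilities.any
          (fun c => PySem.Set.contains (pvCapabilityActions.getD c PySem.Set.empty) action) := by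
  induction capabilities with
  | nil => rfl
  | cons c rest ih =>
    rw [pvCapLoopA]
    by_cases hc : pvCapValues.contains c = true
    · rw [if_pos hc, List.any_cons, ← ih]
      by_cases hm : PySem.Set.contains (pvCapabilityActions.getD c PySem.Set.empty) action = true
      · rw [hm]; simp
      · simp only [Bool.not_eq_true] at hm
        rw [hm]; simp
    · simp only [Bool.not_eq_true] at hc
      rw [hc, List.any_cons, pvInvalidCap c action hc, ih]
      simp

-- ===== VERDICT (by name: the statement is the Claim_ definition above) =====
theorem capability_allows_spec : Claim_equal_capability_allows := by
  intro capabilities action _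
  unfold Spec_capability_allows capability_allows capability_allows_alt
  by_cases hv : pvActionValues.contains action = true
  · rw [if_pos hv, pvCapLoopA_eq_any]
    cases hg : pvActionToCaps.get? action with
    | none =>
      have hfalse : ∀ c, PySem.Set.contains (pvCapabilityActions.getD c PySem.Set.empty) action
          = false := by
        intro c
        rw [pvInversion c action, hg]
        rfl
      rw [show (fun c => PySem.Set.contains (pvCapabilityActions.getD c PySem.Set.empty) action)
            = fun _ => false from funext hfalse]
      simp
    | some allowed =>
      have hrel : ∀ c, PySem.Set.contains (pvCapabilityActions.getD c PySem.Set.empty) action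
          = PySem.Set.contains allowed c := by
        intro c
        rw [pvInversion c action, hg]; rfl
      rw [Bool.eq_iff_iff, Bool.not_eq_true', Bool.eq_false_iff, Ne, PySem.Set.isdisjoint_iff]
      push Not
      simp only [List.any_eq_true, hrel, PySem.Set.contains_iff]
      constructor
      · rintro ⟨c, hcmem, hcall⟩; exact ⟨c, hcall, hcmem⟩
      · rintro ⟨c, hcall, hcmem⟩; exact ⟨c, hcmem, hcall⟩
  · simp only [Bool.not_eq_true] at hv
    rw [hv, pvActionToCaps_get?_none action hv]
    simp
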